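-- pv_equiv track=rewrite | github.com/involutefish/pitch_class_Set_calculator_expansion | pitch_class_set.py | forte_prime_form
-- ===== SOURCE A (Python) =====
-- def generate_rotations(pcs):
--     """生成集合的所有轮转排列"""
--     pcs={int(x) for x in pcs.split(",") if x.strip().isdigit()}
--     pcs_sorted = sorted(pcs)  # 先对集合进行升序排序
--     return [pcs_sorted[i:] + pcs_sorted[:i] for i in range(len(pcs_sorted))]
--
-- def inversion(pcs):
--     pcs = {int(x) for x in pcs.split(",") if x.strip().isdigit()}
--     pcs_sorted = sorted(pcs)  # 先对集合进行升序排序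
--     inversion_pcs=[]
--     for i in pcs:
--         pitch_class=(12-i) % 12
--         inversion_pcs.append(pitch_class)
--     inversion_pcs=sorted(inversion_pcs)
--     return inversion_pcs
--
-- def compacted_sets(pcs):
--     rotations = generate_rotations(pcs)  # generate all rotated sets 生成所有轮转排列
--     interval_set = []
--     # calculate width of rotated sets轮转排列的宽度
--     for ps in rotations:
--         interval = (ps[-1] - ps[0]) % 12
--         interval_set.append(interval)
--     # 找到最小值及其索引
--     min_value = min(interval_set)  # 获取最小宽度
--     min_indices = [index for index, value in enumerate(interval_set) if value == min_value]  # 获取最小值的索引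
--     #compacted sets
--     compacted_sets=[]
--     for i in min_indices:
--         compacted_sets.append(rotations[i])
--     return compacted_sets
--
-- def forte_normal_form(pcs):
--     set_list = compacted_sets(pcs)  # 获取最窄集合
--     if len(set_list) == 1:
--         return set_list[0]  # 如果只有一个最窄集合，则直接输出
--     def recursive_selection(sets, index):
--         #如果最窄集合只有一个，那么直接输出就是福特标准型
--         if len(sets) == 1 or index >= len(sets[0]):
--             return min(sets)  # 若最终仍有多个集合，则选取最左侧最小者
--         #开始计算
--         interval_diffs = []
--         for ps in sets:
--             interval = (ps[index] - ps[0]) % 12  # 计算第2, 3, ..., index个音与第1个音在12模下的音程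
--             interval_diffs.append(interval)
--         min_value = min(interval_diffs)  # 获取最小音程
--         min_indices = [i for i, value in enumerate(interval_diffs) if value == min_value]  # 获取最小值索引
--         filtered_sets = [sets[i] for i in min_indices]  # 获取符合条件的集合
--         return recursive_selection(filtered_sets, index + 1)
--     forte_normal_form = recursive_selection(set_list, 1)  # 计算最终福特标准型
--     return forte_normal_form
--
-- def forte_prime_form(pcs):
--     pcs_normal_form = forte_normal_form(pcs)  # 原位集合标准型
--     inversion_pcs = inversion(pcs)  # 倒影集合
--     inversion_pcs_normal_form = forte_normal_form(",".join(map(str, inversion_pcs)))  # 转换为字符串格式后传入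
--
--     sets = [pcs_normal_form, inversion_pcs_normal_form]  # 创建包含两个集合的列表
--
--     def recursive_selection(sets, index):
--         """递归计算福特标准型"""
--         if len(sets) == 1 or index >= len(sets[0]):
--             return min(sets)  # 选取最左侧最小者
--
--         interval_diffs = [(ps[index] - ps[0]) % 12 for ps in sets]  # 计算第 index 个音相对于第一个音的音程
--         min_value = min(interval_diffs)  # 获取最小音程
--         min_indices = [i for i, value in enumerate(interval_diffs) if value == min_value]  # 获取最小值索引
--         filtered_sets = [sets[i] for i in min_indices]  # 选出符合条件的集合
--
--         return recursive_selection(filtered_sets, index + 1)  # 递归进行下一步计算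
--     forte_prime_form_temp = recursive_selection(sets, 1)  # 计算最终福特标准型
--     a=(forte_prime_form_temp[0]-0)%12
--     forte_prime_form=[(i-a)%12 for i in forte_prime_form_temp]#左侧为0
--     return forte_prime_form
-- ===== SOURCE B (Python) =====
-- def forte_prime_form(pcs):
--     vals = {int(x) for x in pcs.split(",") if x.strip().isdigit()}
--     base = sorted(vals)
--     inv = sorted({(12 - v) % 12 for v in vals})
--
--     def key(ps, with_width):
--         head = [(ps[-1] - ps[0]) % 12] if with_width else []
--         return (head + [(ps[j] - ps[0]) % 12 for j in range(1, len(ps))], ps)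
--
--     def best(cands, with_width):
--         b = cands[0]
--         kb = key(b, with_width)
--         for ps in cands[1:]:
--             k = key(ps, with_width)
--             if k < kb:
--                 b, kb = ps, k
--         return b
--
--     nf = best([base[i:] + base[:i] for i in range(len(base))], True)
--     nf_inv = best([inv[i:] + inv[:i] for i in range(len(inv))], True)
--     chosen = best([nf, nf_inv], False)
--     t = chosen[0] % 12
--     return [(x - t) % 12 for x in chosen]
-- ===== Notes on version B (the rewrite author's own statement) =====
-- stated objective: simpler
-- what changed: Replaces the min-width filter plus two copies of a recursive filter-and-narrow selection (filter by minimal interval at each index, recursing with enumerate/index bookkeeping) and the string join/re-parse round-trip for the inversion by a single keyed one-pass minimum: each candidate rotation gets the key (width-prefixed interval list, rotation) and one linear scan picks the lexicographic minimum; the inversion's pitch classes are computed directly as a set instead of being serialized to a string and re-parsed.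
-- outside the precondition, e.g. on forte_prime_form('1,7,6, 3 ,13,9'): A returns [0, 2, 3, 6, 8], B returns [0, 2, 3, 6, 8]; on forte_prime_form('0,2,5,14'): A returns [0, 2, 5, 2], B returns [0, 2, 5, 2]
import Mathlib
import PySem

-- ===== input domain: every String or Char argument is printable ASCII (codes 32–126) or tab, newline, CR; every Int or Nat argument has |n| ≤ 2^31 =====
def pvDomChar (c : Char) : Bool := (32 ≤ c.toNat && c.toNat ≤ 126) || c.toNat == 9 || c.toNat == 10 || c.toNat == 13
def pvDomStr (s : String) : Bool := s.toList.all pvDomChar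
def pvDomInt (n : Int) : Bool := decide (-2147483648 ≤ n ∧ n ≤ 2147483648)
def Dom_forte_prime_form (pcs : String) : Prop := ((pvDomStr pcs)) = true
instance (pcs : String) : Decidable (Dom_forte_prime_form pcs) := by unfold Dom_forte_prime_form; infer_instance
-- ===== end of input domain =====

-- B replaces A's min-width filter + recursive interval-filter narrowing (and the string
-- join/re-parse round-trip for the inversion) by a single keyed one-pass minimum over the
-- rotations; same return value on Pre_, no mutation of arguments.

-- ===== PORT A =====
-- {int(x) for x in pcs.split(",") if x.strip().isdigit()}  (set in first-insertion order)
def pvParseA (cs : List Char) : PySem.Set Int :=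
  PySem.Set.ofList (((PySem.Chars.splitOn cs [',']).filter
      (fun x => PySem.Chars.strIsdigit (PySem.Chars.strip x))).map
      (fun x => (PySem.Int.ofChars? x).getD 0))

def pvGenerate_rotations (cs : List Char) : List (List Int) :=
  let pcs_sorted := PySem.List.sorted (pvParseA cs) (fun v => v) false
  (PySem.List.pyRange 0 (PySem.List.len pcs_sorted) 1).map
    (fun i => PySem.List.slice pcs_sorted (some i) none ++ PySem.List.slice pcs_sorted none (some i))

-- Python iterates over the set `pcs`; the loop's output is sorted afterwards, so the
-- (unmodelled) set iteration order cannot affect the result.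
def pvInversion (cs : List Char) : List Int :=
  PySem.List.sorted ((pvParseA cs).map (fun i => PySem.Int.mod (12 - i) 12)) (fun v => v) false

def pvCompacted_sets (cs : List Char) : List (List Int) :=
  let rotations := pvGenerate_rotations cs
  let interval_set := rotations.foldl
    (fun acc ps => acc ++ [PySem.Int.mod (PySem.List.pyGetD ps (-1) 0 - PySem.List.pyGetD ps 0 0) 12]) []
  let min_value := (PySem.List.min? interval_set (fun v => v)).getD 0
  let min_indices := ((PySem.List.enumerate interval_set 0).filter (fun p => p.2 == min_value)).map (fun p => p.1)
  min_indices.foldl (fun acc i => acc ++ [PySem.List.pyGetD rotations i []]) []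

-- A defines the identical nested function `recursive_selection` twice (in forte_normal_form
-- with a for/append loop, in forte_prime_form with the equivalent comprehension); ported once.
-- fuel only makes the index recursion structural; the `index >= len(sets[0])` guard fires first.
def pvRecSel (fuel : Nat) (sets : List (List Int)) (index : Int) : List Int :=
  match fuel with
  | 0 => (PySem.List.min? sets (fun v => v)).getD []
  | fuel' + 1 =>
    if sets.length == 1 || decide ((PySem.List.pyGetD sets 0 []).length ≤ index) then
      (PySem.List.min? sets (fun v => v)).getD []
    else
      let interval_diffs := sets.map
        (fun ps => PySem.Int.mod (PySem.List.pyGetD ps index 0 - PySem.List.pyGetD ps 0 0) 12)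
      let min_value := (PySem.List.min? interval_diffs (fun v => v)).getD 0
      let filtered := ((PySem.List.enumerate interval_diffs 0).filter (fun p => p.2 == min_value)).map
        (fun p => PySem.List.pyGetD sets p.1 [])
      pvRecSel fuel' filtered (index + 1)

def pvForte_normal_form (cs : List Char) : List Int :=
  let set_list := pvCompacted_sets cs
  if set_list.length == 1 then PySem.List.pyGetD set_list 0 []
  else pvRecSel (PySem.List.pyGetD set_list 0 []).length set_list 1

def forte_prime_form (pcs : String) : List Int :=
  let cs := pcs.toList
  let pcs_normal_form := pvForte_normal_form cs
  let inversion_pcs := pvInversion cs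
  let inversion_normal := pvForte_normal_form (PySem.Chars.join [','] (inversion_pcs.map PySem.Int.toChars))
  let sets := [pcs_normal_form, inversion_normal]
  let temp := pvRecSel (PySem.List.pyGetD sets 0 []).length sets 1
  let a := PySem.Int.mod (PySem.List.pyGetD temp 0 0 - 0) 12
  temp.map (fun i => PySem.Int.mod (i - a) 12)

-- ===== PORT B =====
def pvParseB (cs : List Char) : PySem.Set Int :=
  PySem.Set.ofList (((PySem.Chars.splitOn cs [',']).filter
      (fun x => PySem.Chars.strIsdigit (PySem.Chars.strip x))).map
      (fun x => (PySem.Int.ofChars? x).getD 0))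

-- key(ps, with_width) from Source B
def pvKeyB (ps : List Int) (withWidth : Bool) : List Int × List Int :=
  ((if withWidth then [PySem.Int.mod (PySem.List.pyGetD ps (-1) 0 - PySem.List.pyGetD ps 0 0) 12] else []) ++
     (PySem.List.pyRange 1 (PySem.List.len ps) 1).map
       (fun j => PySem.Int.mod (PySem.List.pyGetD ps j 0 - PySem.List.pyGetD ps 0 0) 12),
   ps)

-- best(cands, with_width) from Source B: one-pass first minimum under Python tuple comparison
def pvBest (cands : List (List Int)) (withWidth : Bool) : List Int :=
  match cands with
  | [] => []      -- Python raises IndexError on cands[0]; excluded by Pre_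
  | b :: rest =>
    (rest.foldl (fun st ps =>
        let k := pvKeyB ps withWidth
        if decide (k.1 < st.2.1) || (k.1 == st.2.1 && decide (k.2 < st.2.2)) then (ps, k) else st)
      (b, pvKeyB b withWidth)).1

def pvRots (ps : List Int) : List (List Int) :=
  (PySem.List.pyRange 0 (PySem.List.len ps) 1).map
    (fun i => PySem.List.slice ps (some i) none ++ PySem.List.slice ps none (some i))

def forte_prime_form_alt (pcs : String) : List Int :=
  let vals := pvParseB pcs.toList
  let base := PySem.List.sorted vals (fun v => v) false
  let inv := PySem.List.sorted (PySem.Set.ofList (vals.map (fun v => PySem.Int.mod (12 - v) 12))) (fun v => v) false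
  let nf := pvBest (pvRots base) true
  let nfInv := pvBest (pvRots inv) true
  let chosen := pvBest [nf, nfInv] false
  let t := PySem.Int.mod (PySem.List.pyGetD chosen 0 0) 12
  chosen.map (fun x => PySem.Int.mod (x - t) 12)

-- ===== PRECONDITION & SPEC =====
-- Pre_ excludes inputs with no digit token (A's min() over the empty rotation list raises
-- ValueError) and inputs whose parsed values collide modulo 12: there the inversion's normal
-- form is SHORTER than the set's, A's index-wise comparison raises IndexError whenever no
-- earlier interval discriminates, and where an earlier interval does discriminate A returns
-- the same value B returns (see the cites).
def Pre_forte_prime_form (pcs : String) : Prop :=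
  let toks := (PySem.Chars.splitOn pcs.toList [',']).filter
      (fun x => PySem.Chars.strIsdigit (PySem.Chars.strip x))
  toks ≠ [] ∧
    ((PySem.Set.ofList (toks.map (fun x => (PySem.Int.ofChars? x).getD 0))).map
        (fun v => PySem.Int.mod v 12)).Nodup
instance (pcs : String) : Decidable (Pre_forte_prime_form pcs) := by
  unfold Pre_forte_prime_form; infer_instance

def pvWitness_forte_prime_form : String := "0,1,4"

def Spec_forte_prime_form (pcs : String) (out : List Int) : Prop := out = forte_prime_form_alt pcs
instance (pcs : String) (out : List Int) : Decidable (Spec_forte_prime_form pcs out) := by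
  unfold Spec_forte_prime_form; infer_instance

-- ===== CLAIM (what is proved, stated in full; the proofs are below) =====
def Claim_equal_forte_prime_form : Prop := ∀ (pcs : String), Dom_forte_prime_form pcs → Pre_forte_prime_form pcs → Spec_forte_prime_form pcs (forte_prime_form pcs)

-- ===== LEMMAS AND PROOFS =====

-- ---- key order infrastructure (proof-only) ----
def pvW (ps : List Int) : Int :=
  PySem.Int.mod (PySem.List.pyGetD ps (-1) 0 - PySem.List.pyGetD ps 0 0) 12

def pvD (i : Int) (ps : List Int) : Int :=
  PySem.Int.mod (PySem.List.pyGetD ps i 0 - PySem.List.pyGetD ps 0 0) 12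

def pvTailK (i : Int) (ps : List Int) : List Int :=
  (PySem.List.pyRange i (PySem.List.len ps) 1).map (fun j => pvD j ps)

def pvKLe (k : List Int → List Int) (a b : List Int) : Prop :=
  k a < k b ∨ (k a = k b ∧ a ≤ b)

def pvKLt (k : List Int → List Int) (a b : List Int) : Prop :=
  k a < k b ∨ (k a = k b ∧ a < b)

def pvIsMin (k : List Int → List Int) (sets : List (List Int)) (u : List Int) : Prop :=
  u ∈ sets ∧ ∀ v ∈ sets, pvKLe k u v

lemma pvKLe_refl (k : List Int → List Int) (a : List Int) : pvKLe k a a :=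
  Or.inr ⟨rfl, le_refl a⟩

lemma pvKLe_trans {k : List Int → List Int} {a b c : List Int}
    (h1 : pvKLe k a b) (h2 : pvKLe k b c) : pvKLe k a c := by
  rcases h1 with h1 | ⟨e1, l1⟩
  · rcases h2 with h2 | ⟨e2, l2⟩
    · exact Or.inl (lt_trans h1 h2)
    · exact Or.inl (e2 ▸ h1)
  · rcases h2 with h2 | ⟨e2, l2⟩
    · exact Or.inl (e1 ▸ h2)
    · exact Or.inr ⟨e1.trans e2, le_trans l1 l2⟩

lemma pvKLe_of_kLt {k : List Int → List Int} {a b : List Int} (h : pvKLt k a b) : pvKLe k a b := by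
  rcases h with h | ⟨e, l⟩
  · exact Or.inl h
  · exact Or.inr ⟨e, le_of_lt l⟩

lemma pvKLe_of_not_kLt {k : List Int → List Int} {a b : List Int} (h : ¬ pvKLt k a b) : pvKLe k b a := by
  rcases lt_trichotomy (k a) (k b) with h1 | h1 | h1
  · exact absurd (Or.inl h1) h
  · rcases lt_trichotomy a b with h2 | h2 | h2
    · exact absurd (Or.inr ⟨h1, h2⟩) h
    · exact Or.inr ⟨h1.symm, le_of_eq h2.symm⟩
    · exact Or.inr ⟨h1.symm, le_of_lt h2⟩
  · exact Or.inl h1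

lemma pvUnique {k : List Int → List Int} {sets : List (List Int)} {u v : List Int}
    (hu : pvIsMin k sets u) (hv : pvIsMin k sets v) : u = v := by
  have h1 := hu.2 v hv.1
  have h2 := hv.2 u hu.1
  rcases h1 with h1 | ⟨e1, l1⟩
  · rcases h2 with h2 | ⟨e2, l2⟩
    · exact absurd (lt_trans h1 h2) (lt_irrefl _)
    · exact absurd (e2 ▸ h1) (lt_irrefl _)
  · rcases h2 with h2 | ⟨e2, l2⟩
    · exact absurd (e1 ▸ h2) (lt_irrefl _)
    · exact le_antisymm l1 l2

-- the enumerate/filter-by-min/index dance is a plain filter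
lemma pvSel (d : List Int → Int) (c : Int) :
    ∀ (sets pre : List (List Int)),
      (((PySem.List.enumerate (sets.map d) ((pre.length : Int))).filter (fun p => p.2 == c)).map
        (fun p => PySem.List.pyGetD (pre ++ sets) p.1 [])) = sets.filter (fun ps => d ps == c) := by
  intro sets
  induction sets with
  | nil => intro pre; simp [PySem.List.enumerate_nil]
  | cons s rest ih =>
    intro pre
    have hget : PySem.List.pyGetD (pre ++ s :: rest) ((pre.length : Int)) ([] : List Int) = s := by
      rw [PySem.List.pyGetD_natCast]
      rw [List.getD_eq_getElem?_getD, List.getElem?_append_right (Nat.le_refl pre.length)]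
      simp
    have hstep : ((pre.length : Int)) + 1 = (((pre ++ [s]).length : Nat) : Int) := by
      simp [List.length_append]
    have hrec := ih (pre ++ [s])
    rw [List.append_assoc] at hrec
    simp only [List.singleton_append] at hrec
    simp only [List.map_cons, PySem.List.enumerate_cons, List.filter_cons]
    by_cases h : d s = c
    · simp only [h, beq_self_eq_true, if_pos]
      rw [List.map_cons, hget, hstep, hrec]
    · have hb : (d s == c) = false := beq_eq_false_iff_ne.mpr h
      simp only [hb, Bool.false_eq_true, if_false]
      rw [hstep, hrec]

lemma pvMin?_go {α κ : Type} [LT κ] [DecidableLT κ]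
    (htrans : ∀ a b c : κ, a < b → b < c → a < c)
    (htrans' : ∀ a b c : κ, a < b → ¬ c < b → a < c)
    (hirr : ∀ a : κ, ¬ a < a) (key : α → κ) :
    ∀ (xs : List α) (m : α), ∃ m',
      xs.foldl (fun acc x =>
        match acc with
        | none => some x
        | some m => if key x < key m then some x else some m) (some m) = some m' ∧
      (m' = m ∨ m' ∈ xs) ∧ ¬ key m < key m' ∧ ∀ y ∈ xs, ¬ key y < key m' := by
  intro xs
  induction xs with
  | nil => intro m; exact ⟨m, rfl, Or.inl rfl, hirr _, by simp⟩
  | cons x xs ih =>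
    intro m
    by_cases hx : key x < key m
    · obtain ⟨m', hfold, hmem, hm1, hall⟩ := ih x
      refine ⟨m', by simpa [hx] using hfold, ?_, ?_, ?_⟩
      · rcases hmem with rfl | h
        · exact Or.inr (List.mem_cons_self)
        · exact Or.inr (List.mem_cons_of_mem _ h)
      · intro hc; exact hm1 (htrans _ _ _ hx hc)
      · intro y hy
        rcases List.mem_cons.mp hy with rfl | h
        · exact hm1
        · exact hall y h
    · obtain ⟨m', hfold, hmem, hm1, hall⟩ := ih m
      refine ⟨m', by simpa [hx] using hfold, ?_, hm1, ?_⟩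
      · rcases hmem with rfl | h
        · exact Or.inl rfl
        · exact Or.inr (List.mem_cons_of_mem _ h)
      · intro y hy
        rcases List.mem_cons.mp hy with rfl | h
        · intro hc; exact hx (htrans' _ _ _ hc hm1)
        · exact hall y h

lemma pvMin?_some {α κ : Type} [LT κ] [DecidableLT κ]
    (htrans : ∀ a b c : κ, a < b → b < c → a < c)
    (htrans' : ∀ a b c : κ, a < b → ¬ c < b → a < c)
    (hirr : ∀ a : κ, ¬ a < a)
    (xs : List α) (key : α → κ) (h : xs ≠ []) :
    ∃ m, PySem.List.min? xs key = some m ∧ m ∈ xs ∧ ∀ y ∈ xs, ¬ key y < key m := by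
  cases xs with
  | nil => exact absurd rfl h
  | cons x xs =>
    obtain ⟨m, hfold, hmem, hm1, hall⟩ := pvMin?_go htrans htrans' hirr key xs x
    refine ⟨m, ?_, ?_, ?_⟩
    · simpa [PySem.List.min?] using hfold
    · rcases hmem with rfl | hm
      · exact List.mem_cons_self
      · exact List.mem_cons_of_mem _ hm
    · intro y hy
      rcases List.mem_cons.mp hy with rfl | hm
      · exact hm1
      · exact hall y hm

lemma pvIntArgs : (∀ a b c : Int, a < b → b < c → a < c) ∧ (∀ a b c : Int, a < b → ¬ c < b → a < c) ∧ (∀ a : Int, ¬ a < a) :=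
  ⟨fun _ _ _ h1 h2 => lt_trans h1 h2, fun _ _ _ h1 h2 => lt_of_lt_of_le h1 (le_of_not_gt h2), fun _ => lt_irrefl _⟩

lemma pvListArgs : (∀ a b c : List Int, a < b → b < c → a < c) ∧ (∀ a b c : List Int, a < b → ¬ c < b → a < c) ∧ (∀ a : List Int, ¬ a < a) :=
  ⟨fun _ _ _ h1 h2 => lt_trans h1 h2, fun _ _ _ h1 h2 => lt_of_lt_of_le h1 (le_of_not_gt h2), fun _ => lt_irrefl _⟩


lemma pvTailK_nil {i : Int} {ps : List Int} {n : Nat} (hlen : ps.length = n) (hin : (n : Int) ≤ i) :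
    pvTailK i ps = [] := by
  unfold pvTailK
  rw [PySem.List.len_eq, hlen, PySem.List.pyRange_one_eq_nil hin, List.map_nil]

lemma pvTailK_cons {i : Int} {ps : List Int} (hlt : i < (ps.length : Int)) :
    pvTailK i ps = pvD i ps :: pvTailK (i + 1) ps := by
  unfold pvTailK
  rw [PySem.List.len_eq, PySem.List.pyRange_one_cons hlt, List.map_cons]

lemma pvMinBase (sets : List (List Int)) (i : Int) (n : Nat)
    (hne : sets ≠ []) (hlen : ∀ ps ∈ sets, ps.length = n) (hin : (n : Int) ≤ i) :
    pvIsMin (pvTailK i) sets ((PySem.List.min? sets (fun v => v)).getD []) := by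
  obtain ⟨m, hm, hmem, hmin⟩ :=
    pvMin?_some pvListArgs.1 pvListArgs.2.1 pvListArgs.2.2 sets (fun v => v) hne
  rw [hm]
  refine ⟨hmem, ?_⟩
  intro v hv
  exact Or.inr ⟨(pvTailK_nil (hlen m hmem) hin).trans (pvTailK_nil (hlen v hv) hin).symm,
    le_of_not_gt (hmin v hv)⟩

lemma pvLift (d : List Int → Int) (k : List Int → List Int) (sets : List (List Int)) (c : Int) (u : List Int)
    (hcmin : ∀ v ∈ sets, c ≤ d v)
    (hu : pvIsMin k (sets.filter (fun ps => d ps == c)) u) :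
    pvIsMin (fun ps => d ps :: k ps) sets u := by
  obtain ⟨humem, hmin⟩ := hu
  have h1 := List.mem_filter.mp humem
  have hdu : d u = c := by simpa using h1.2
  refine ⟨h1.1, ?_⟩
  intro v hv
  by_cases hdv : d v = c
  · have hvf : v ∈ sets.filter (fun ps => d ps == c) := List.mem_filter.mpr ⟨hv, by simp [hdv]⟩
    rcases hmin v hvf with h | ⟨e, l⟩
    · exact Or.inl (show (d u :: k u) < (d v :: k v) by rw [hdu, hdv]; exact List.Lex.cons h)
    · exact Or.inr ⟨show (d u :: k u) = (d v :: k v) by rw [hdu, hdv, e], l⟩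
  · have hc : c < d v := lt_of_le_of_ne (hcmin v hv) (fun e => hdv e.symm)
    exact Or.inl (show (d u :: k u) < (d v :: k v) by rw [hdu]; exact List.Lex.rel hc)

lemma pvRecSel_spec : ∀ (fuel : Nat) (sets : List (List Int)) (i : Int) (n : Nat),
    sets ≠ [] → (∀ ps ∈ sets, ps.length = n) → 0 ≤ i → (n : Int) ≤ i + (fuel : Int) →
    pvIsMin (pvTailK i) sets (pvRecSel fuel sets i) := by
  intro fuel
  induction fuel with
  | zero =>
    intro sets i n hne hlen hi hbound
    unfold pvRecSel
    exact pvMinBase sets i n hne hlen (by simpa using hbound)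
  | succ fuel ih =>
    intro sets i n hne hlen hi hbound
    by_cases hone : sets.length = 1
    · obtain ⟨u, rfl⟩ := List.length_eq_one_iff.mp hone
      have hval : pvRecSel (fuel + 1) [u] i = u := by simp [pvRecSel, PySem.List.min?]
      rw [hval]
      refine ⟨List.mem_singleton_self u, ?_⟩
      intro v hv
      rw [List.mem_singleton] at hv
      subst hv
      exact pvKLe_refl _ _
    · obtain ⟨s, rest, rfl⟩ : ∃ s rest, sets = s :: rest := by
        cases sets with
        | nil => exact absurd rfl hne
        | cons s rest => exact ⟨s, rest, rfl⟩
      by_cases hidx : ((PySem.List.pyGetD (s :: rest) 0 ([] : List Int)).length : Int) ≤ i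
      · have hin : (n : Int) ≤ i := by
          have h := hlen s List.mem_cons_self
          rw [PySem.List.pyGetD_zero_cons] at hidx
          rw [h] at hidx
          exact hidx
        have hcondT : ((s :: rest).length == 1 || decide (((PySem.List.pyGetD (s :: rest) 0 ([] : List Int)).length : Int) ≤ i)) = true := by
          rw [decide_eq_true hidx, Bool.or_true]
        have hval : pvRecSel (fuel + 1) (s :: rest) i = (PySem.List.min? (s :: rest) (fun v => v)).getD [] := by
          rw [pvRecSel, if_pos hcondT]
        rw [hval]
        exact pvMinBase _ i n hne hlen hin
      · have hlt : i < (n : Int) := by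
          have h := hlen s List.mem_cons_self
          rw [PySem.List.pyGetD_zero_cons, h] at hidx
          omega
        have hcond : ((s :: rest).length == 1 || decide (((PySem.List.pyGetD (s :: rest) 0 ([] : List Int)).length : Int) ≤ i)) = false := by
          rw [decide_eq_false hidx, Bool.or_false, beq_eq_false_iff_ne]
          exact hone
        set sets := s :: rest with hsets
        set d := fun ps => pvD i ps with hd
        have hmapne : sets.map d ≠ [] := by simp [hsets]
        obtain ⟨c, hc, hcmem, hcmin⟩ :=
          pvMin?_some pvIntArgs.1 pvIntArgs.2.1 pvIntArgs.2.2 (sets.map d) (fun v => v) hmapne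
        have hstep : pvRecSel (fuel + 1) sets i =
            pvRecSel fuel (((PySem.List.enumerate (sets.map d) 0).filter (fun p => p.2 == c)).map
              (fun p => PySem.List.pyGetD sets p.1 [])) (i + 1) := by
          rw [pvRecSel, if_neg (by rw [hcond]; exact Bool.false_ne_true)]
          have hdiffs : sets.map (fun ps => PySem.Int.mod (PySem.List.pyGetD ps i 0 - PySem.List.pyGetD ps 0 0) 12) = sets.map d := rfl
          dsimp only
          rw [hdiffs, hc, Option.getD_some]
        have hfilter : ((PySem.List.enumerate (sets.map d) 0).filter (fun p => p.2 == c)).map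
            (fun p => PySem.List.pyGetD sets p.1 []) = sets.filter (fun ps => d ps == c) := by
          simpa using pvSel d c sets []
        have hdc : ∀ v ∈ sets, c ≤ d v := by
          intro v hv
          exact le_of_not_gt (hcmin (d v) (List.mem_map_of_mem hv))
        have hfne : sets.filter (fun ps => d ps == c) ≠ [] := by
          obtain ⟨ps, hps, hdps⟩ := List.mem_map.mp hcmem
          exact List.ne_nil_of_mem (List.mem_filter.mpr ⟨hps, by simp [hdps]⟩)
        have hflen : ∀ ps ∈ sets.filter (fun ps => d ps == c), ps.length = n :=
          fun ps hps => hlen ps (List.mem_filter.mp hps).1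
        have hrec := ih (sets.filter (fun ps => d ps == c)) (i + 1) n hfne hflen (by omega)
          (by push_cast at hbound ⊢; omega)
        rw [hstep, hfilter]
        have hlift := pvLift d (pvTailK (i + 1)) sets c _ hdc hrec
        refine ⟨hlift.1, ?_⟩
        intro v hv
        have hku : pvTailK i (pvRecSel fuel (sets.filter (fun ps => d ps == c)) (i + 1)) =
            d (pvRecSel fuel (sets.filter (fun ps => d ps == c)) (i + 1)) ::
              pvTailK (i + 1) (pvRecSel fuel (sets.filter (fun ps => d ps == c)) (i + 1)) := by
          have := pvTailK_cons (ps := pvRecSel fuel (sets.filter (fun ps => d ps == c)) (i + 1))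
            (i := i) (by rw [hlen _ hlift.1]; exact hlt)
          exact this
        have hkv : pvTailK i v = d v :: pvTailK (i + 1) v :=
          pvTailK_cons (by rw [hlen v hv]; exact hlt)
        have hres := hlift.2 v hv
        unfold pvKLe at hres ⊢
        rw [hku, hkv]
        exact hres

-- ---- B's one-pass keyed minimum ----
def pvKB (ww : Bool) (ps : List Int) : List Int := (pvKeyB ps ww).1

lemma pvKeyB_snd (ps : List Int) (ww : Bool) : (pvKeyB ps ww).2 = ps := rfl

lemma pvTest_iff (ww : Bool) (x b : List Int) :
    ((decide ((pvKeyB x ww).1 < (pvKeyB b ww).1) ||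
      ((pvKeyB x ww).1 == (pvKeyB b ww).1 && decide ((pvKeyB x ww).2 < (pvKeyB b ww).2))) = true)
    ↔ pvKLt (pvKB ww) x b := by
  simp only [pvKeyB_snd, Bool.or_eq_true, Bool.and_eq_true, decide_eq_true_eq, beq_iff_eq]
  exact Iff.rfl

lemma pvFold_spec (ww : Bool) :
    ∀ (rest : List (List Int)) (b : List Int),
      ((rest.foldl (fun st ps =>
          let k := pvKeyB ps ww
          if decide (k.1 < st.2.1) || (k.1 == st.2.1 && decide (k.2 < st.2.2)) then (ps, k) else st)
        (b, pvKeyB b ww)).1 = b ∨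
       (rest.foldl (fun st ps =>
          let k := pvKeyB ps ww
          if decide (k.1 < st.2.1) || (k.1 == st.2.1 && decide (k.2 < st.2.2)) then (ps, k) else st)
        (b, pvKeyB b ww)).1 ∈ rest) ∧
      pvKLe (pvKB ww) ((rest.foldl (fun st ps =>
          let k := pvKeyB ps ww
          if decide (k.1 < st.2.1) || (k.1 == st.2.1 && decide (k.2 < st.2.2)) then (ps, k) else st)
        (b, pvKeyB b ww)).1) b ∧
      ∀ v ∈ rest, pvKLe (pvKB ww) ((rest.foldl (fun st ps =>
          let k := pvKeyB ps ww
          if decide (k.1 < st.2.1) || (k.1 == st.2.1 && decide (k.2 < st.2.2)) then (ps, k) else st)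
        (b, pvKeyB b ww)).1) v := by
  intro rest
  induction rest with
  | nil =>
    intro b
    exact ⟨Or.inl rfl, pvKLe_refl _ _, by simp⟩
  | cons x rest ih =>
    intro b
    by_cases hx : pvKLt (pvKB ww) x b
    · have hstep : (x :: rest).foldl (fun st ps =>
          let k := pvKeyB ps ww
          if decide (k.1 < st.2.1) || (k.1 == st.2.1 && decide (k.2 < st.2.2)) then (ps, k) else st)
          (b, pvKeyB b ww) =
          rest.foldl (fun st ps =>
          let k := pvKeyB ps ww
          if decide (k.1 < st.2.1) || (k.1 == st.2.1 && decide (k.2 < st.2.2)) then (ps, k) else st)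
          (x, pvKeyB x ww) := by
        rw [List.foldl_cons]
        congr 1
        simp only [if_pos ((pvTest_iff ww x b).mpr hx)]
      rw [hstep]
      obtain ⟨hmem, hle, hall⟩ := ih x
      refine ⟨?_, ?_, ?_⟩
      · rcases hmem with h | h
        · exact Or.inr (by rw [h]; exact List.mem_cons_self)
        · exact Or.inr (List.mem_cons_of_mem _ h)
      · exact pvKLe_trans hle (pvKLe_of_kLt hx)
      · intro v hv
        rcases List.mem_cons.mp hv with rfl | h
        · exact hle
        · exact hall v h
    · have hstep : (x :: rest).foldl (fun st ps =>
          let k := pvKeyB ps ww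
          if decide (k.1 < st.2.1) || (k.1 == st.2.1 && decide (k.2 < st.2.2)) then (ps, k) else st)
          (b, pvKeyB b ww) =
          rest.foldl (fun st ps =>
          let k := pvKeyB ps ww
          if decide (k.1 < st.2.1) || (k.1 == st.2.1 && decide (k.2 < st.2.2)) then (ps, k) else st)
          (b, pvKeyB b ww) := by
        rw [List.foldl_cons]
        congr 1
        simp only [if_neg (fun hc => hx ((pvTest_iff ww x b).mp hc))]
      rw [hstep]
      obtain ⟨hmem, hle, hall⟩ := ih b
      refine ⟨?_, hle, ?_⟩
      · rcases hmem with h | h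
        · exact Or.inl h
        · exact Or.inr (List.mem_cons_of_mem _ h)
      · intro v hv
        rcases List.mem_cons.mp hv with rfl | h
        · exact pvKLe_trans hle (pvKLe_of_not_kLt hx)
        · exact hall v h

lemma pvBest_spec (cands : List (List Int)) (ww : Bool) (h : cands ≠ []) :
    pvIsMin (pvKB ww) cands (pvBest cands ww) := by
  cases cands with
  | nil => exact absurd rfl h
  | cons b rest =>
    obtain ⟨hmem, hle, hall⟩ := pvFold_spec ww rest b
    have hbest : pvBest (b :: rest) ww = (rest.foldl (fun st ps =>
        let k := pvKeyB ps ww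
        if decide (k.1 < st.2.1) || (k.1 == st.2.1 && decide (k.2 < st.2.2)) then (ps, k) else st)
      (b, pvKeyB b ww)).1 := rfl
    rw [hbest]
    refine ⟨?_, ?_⟩
    · rcases hmem with h | h
      · exact (by rw [h]; exact List.mem_cons_self)
      · exact List.mem_cons_of_mem _ h
    · intro v hv
      rcases List.mem_cons.mp hv with rfl | hv
      · exact hle
      · exact hall v hv

lemma pvIsMin_congr {k k' : List Int → List Int} (h : ∀ ps, k ps = k' ps)
    {sets : List (List Int)} {u : List Int} (hu : pvIsMin k sets u) : pvIsMin k' sets u := by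
  have : k = k' := funext h
  exact this ▸ hu

lemma pvKB_true (ps : List Int) : pvKB true ps = pvW ps :: pvTailK 1 ps := rfl

lemma pvKB_false (ps : List Int) : pvKB false ps = pvTailK 1 ps := rfl

-- ---- A's compacted_sets is a filter by minimal width ----
lemma pvCompacted_eq (cs : List Char) :
    pvCompacted_sets cs = (pvGenerate_rotations cs).filter
      (fun ps => pvW ps == (PySem.List.min? ((pvGenerate_rotations cs).map pvW) (fun v => v)).getD 0) := by
  unfold pvCompacted_sets
  dsimp only
  rw [PySem.List.foldl_append_singleton_eq_map, List.nil_append]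
  rw [PySem.List.foldl_append_singleton_eq_map, List.nil_append]
  rw [List.map_map]
  have hsel := pvSel pvW ((PySem.List.min? ((pvGenerate_rotations cs).map pvW) (fun v => v)).getD 0)
    (pvGenerate_rotations cs) []
  exact hsel

-- ---- normal form = keyed minimum over the rotations ----
lemma pvNF_spec (cs : List Char) (n : Nat)
    (hne : pvGenerate_rotations cs ≠ [])
    (hlen : ∀ ps ∈ pvGenerate_rotations cs, ps.length = n) :
    pvIsMin (fun ps => pvW ps :: pvTailK 1 ps) (pvGenerate_rotations cs) (pvForte_normal_form cs) := by
  have hmapne : (pvGenerate_rotations cs).map pvW ≠ [] := by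
    intro h; exact hne (List.map_eq_nil_iff.mp h)
  obtain ⟨c, hc, hcmem, hcmin⟩ :=
    pvMin?_some pvIntArgs.1 pvIntArgs.2.1 pvIntArgs.2.2 ((pvGenerate_rotations cs).map pvW) (fun v => v) hmapne
  have hcomp : pvCompacted_sets cs = (pvGenerate_rotations cs).filter (fun ps => pvW ps == c) := by
    rw [pvCompacted_eq, hc, Option.getD_some]
  have hdc : ∀ v ∈ pvGenerate_rotations cs, c ≤ pvW v := by
    intro v hv
    exact le_of_not_gt (hcmin (pvW v) (List.mem_map_of_mem hv))
  have hfne : (pvGenerate_rotations cs).filter (fun ps => pvW ps == c) ≠ [] := by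
    obtain ⟨ps, hps, hdps⟩ := List.mem_map.mp hcmem
    exact List.ne_nil_of_mem (List.mem_filter.mpr ⟨hps, by simp [hdps]⟩)
  unfold pvForte_normal_form
  rw [hcomp]
  by_cases hone : ((pvGenerate_rotations cs).filter (fun ps => pvW ps == c)).length = 1
  · obtain ⟨u, hu⟩ := List.length_eq_one_iff.mp hone
    rw [hu]
    have hval : (if ([u] : List (List Int)).length == 1 then PySem.List.pyGetD [u] 0 [] else
        pvRecSel (PySem.List.pyGetD ([u] : List (List Int)) 0 []).length [u] 1) = u := by
      simp [PySem.List.pyGetD_zero_cons]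
    rw [hval]
    have hmin1 : pvIsMin (pvTailK 1) ((pvGenerate_rotations cs).filter (fun ps => pvW ps == c)) u := by
      rw [hu]
      refine ⟨List.mem_singleton_self u, ?_⟩
      intro v hv
      rw [List.mem_singleton] at hv
      subst hv
      exact pvKLe_refl _ _
    exact pvLift pvW (pvTailK 1) (pvGenerate_rotations cs) c u hdc hmin1
  · have hcondF : (((pvGenerate_rotations cs).filter (fun ps => pvW ps == c)).length == 1) = false :=
      beq_eq_false_iff_ne.mpr hone
    rw [if_neg (by rw [hcondF]; exact Bool.false_ne_true)]
    obtain ⟨s, t, hst⟩ : ∃ s t, (pvGenerate_rotations cs).filter (fun ps => pvW ps == c) = s :: t := by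
      cases hx : (pvGenerate_rotations cs).filter (fun ps => pvW ps == c) with
      | nil => exact absurd hx hfne
      | cons s t => exact ⟨s, t, rfl⟩
    have hflen : ∀ ps ∈ (pvGenerate_rotations cs).filter (fun ps => pvW ps == c), ps.length = n :=
      fun ps hps => hlen ps (List.mem_filter.mp hps).1
    have hfuel : (PySem.List.pyGetD ((pvGenerate_rotations cs).filter (fun ps => pvW ps == c)) 0 ([] : List Int)).length = n := by
      rw [hst, PySem.List.pyGetD_zero_cons]
      exact hflen s (hst ▸ List.mem_cons_self)
    have hrec := pvRecSel_spec (PySem.List.pyGetD ((pvGenerate_rotations cs).filter (fun ps => pvW ps == c)) 0 ([] : List Int)).length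
      ((pvGenerate_rotations cs).filter (fun ps => pvW ps == c)) 1 n hfne hflen (by omega)
      (by rw [hfuel]; omega)
    exact pvLift pvW (pvTailK 1) (pvGenerate_rotations cs) c _ hdc hrec

-- ---- rotations: shape facts ----
lemma pvRots_len (l : List Int) : ∀ ps ∈ pvRots l, ps.length = l.length := by
  intro ps hps
  obtain ⟨i, hi, rfl⟩ := List.mem_map.mp hps
  have hmem := (PySem.List.mem_pyRange_one).mp hi
  rw [PySem.List.len_eq] at hmem
  have h0 : 0 ≤ i := hmem.1
  have h1 : i < (l.length : Int) := hmem.2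
  rw [PySem.List.slice_from l h0, PySem.List.slice_to l h0, List.length_append,
    List.length_drop, List.length_take]
  omega

lemma pvRots_ne (l : List Int) (h : l ≠ []) : pvRots l ≠ [] := by
  have hlen : (pvRots l).length = l.length := by
    unfold pvRots
    rw [List.length_map, PySem.List.length_pyRange_one, PySem.List.len_eq]
    omega
  intro hx
  rw [hx] at hlen
  exact h (List.eq_nil_of_length_eq_zero hlen.symm)

lemma pvGenRots_eq (cs : List Char) :
    pvGenerate_rotations cs = pvRots (PySem.List.sorted (pvParseB cs) (fun v => v) false) := rfl

-- ---- split/join round-trip for the inversion's serialize-and-reparse ----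
lemma pvGo_no_sep : ∀ (w : List Char), ',' ∉ w → ∀ (fuel : Nat) (cur : List Char) (acc : List (List Char)),
    PySem.Chars.splitOn.go [','] fuel w cur acc = ((cur.reverse ++ w) :: acc).reverse := by
  intro w
  induction w with
  | nil =>
    intro _ fuel cur acc
    cases fuel with
    | zero => rw [PySem.Chars.splitOn.go]
    | succ f => rw [PySem.Chars.splitOn.go]; simp; omega
  | cons c rest ih =>
    intro h fuel cur acc
    have hc : c ≠ ',' := fun e => h (e ▸ List.mem_cons_self)
    have hrest : ',' ∉ rest := fun e => h (List.mem_cons_of_mem _ e)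
    cases fuel with
    | zero => rw [PySem.Chars.splitOn.go]
    | succ f =>
      rw [PySem.Chars.splitOn.go]
      rw [if_neg (by simp only [List.isPrefixOf, beq_iff_eq, Bool.and_eq_true]; exact fun hx => hc (Eq.symm hx.1))]
      rw [ih hrest f (c :: cur) acc]
      simp

lemma pvGo_sep : ∀ (w : List Char), ',' ∉ w → ∀ (fuel : Nat), w.length < fuel →
    ∀ (cur : List Char) (acc : List (List Char)) (rest : List Char),
    PySem.Chars.splitOn.go [','] fuel (w ++ ',' :: rest) cur acc =
      PySem.Chars.splitOn.go [','] (fuel - (w.length + 1)) rest [] ((cur.reverse ++ w) :: acc) := by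
  intro w
  induction w with
  | nil =>
    intro _ fuel hf cur acc rest
    obtain ⟨f, rfl⟩ : ∃ f, fuel = f + 1 := ⟨fuel - 1, by omega⟩
    rw [List.nil_append, PySem.Chars.splitOn.go]
    simp [List.isPrefixOf]
  | cons c w' ih =>
    intro h fuel hf cur acc rest
    have hc : c ≠ ',' := fun e => h (e ▸ List.mem_cons_self)
    have hw' : ',' ∉ w' := fun e => h (List.mem_cons_of_mem _ e)
    obtain ⟨f, rfl⟩ : ∃ f, fuel = f + 1 := ⟨fuel - 1, by omega⟩
    rw [List.cons_append, PySem.Chars.splitOn.go]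
    rw [if_neg (by simp only [List.isPrefixOf, beq_iff_eq, Bool.and_eq_true]; exact fun hx => hc (Eq.symm hx.1))]
    rw [ih hw' f (by simp at hf; omega) (c :: cur) acc rest]
    have harith : f - (w'.length + 1) = f + 1 - ((c :: w').length + 1) := by
      simp only [List.length_cons]; omega
    rw [harith]
    simp

lemma pvSplit_join : ∀ (parts : List (List Char)), parts ≠ [] → (∀ w ∈ parts, ',' ∉ w) →
    ∀ (fuel : Nat), (PySem.Chars.join [','] parts).length < fuel → ∀ (acc : List (List Char)),
    PySem.Chars.splitOn.go [','] fuel (PySem.Chars.join [','] parts) [] acc = acc.reverse ++ parts := by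
  intro parts
  induction parts with
  | nil => intro h; exact absurd rfl h
  | cons w rest ih =>
    intro _ hnc fuel hf acc
    cases rest with
    | nil =>
      rw [PySem.Chars.join_singleton]
      rw [pvGo_no_sep w (hnc w List.mem_cons_self) fuel [] acc]
      simp
    | cons w2 t =>
      have hjoin : PySem.Chars.join [','] (w :: w2 :: t) = w ++ ',' :: PySem.Chars.join [','] (w2 :: t) := by
        rw [PySem.Chars.join_cons_cons]
        simp
      rw [hjoin] at hf ⊢
      have hwlen : w.length < fuel := by
        rw [List.length_append, List.length_cons] at hf
        omega
      rw [pvGo_sep w (hnc w List.mem_cons_self) fuel hwlen [] acc (PySem.Chars.join [','] (w2 :: t))]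
      rw [show (([] : List Char).reverse ++ w) = w by simp]
      rw [ih (by simp) (fun v hv => hnc v (List.mem_cons_of_mem _ hv))
        (fuel - (w.length + 1)) (by rw [List.length_append, List.length_cons] at hf; omega) (w :: acc)]
      simp

lemma pvSplitOn_join (parts : List (List Char)) (hne : parts ≠ []) (hnc : ∀ w ∈ parts, ',' ∉ w) :
    PySem.Chars.splitOn (PySem.Chars.join [','] parts) [','] = parts := by
  unfold PySem.Chars.splitOn
  rw [pvSplit_join parts hne hnc _ (Nat.lt_succ_self _) []]
  rfl

-- facts about str(r) for a pitch class 0 ≤ r < 12, by case exhaustion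
lemma pvDigit (r : Int) (h0 : 0 ≤ r) (h1 : r < 12) :
    (PySem.Int.ofChars? (PySem.Int.toChars r)).getD 0 = r ∧
    PySem.Chars.strIsdigit (PySem.Chars.strip (PySem.Int.toChars r)) = true ∧
    ',' ∉ PySem.Int.toChars r := by
  interval_cases r <;> exact ⟨by decide, by decide, by decide⟩

lemma pvParse_join (l : List Int) (hne : l ≠ []) (hl : ∀ x ∈ l, 0 ≤ x ∧ x < 12) :
    pvParseA (PySem.Chars.join [','] (l.map PySem.Int.toChars)) = PySem.Set.ofList l := by
  unfold pvParseA
  rw [pvSplitOn_join (l.map PySem.Int.toChars) (by simpa using hne)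
    (by
      intro w hw
      obtain ⟨x, hx, rfl⟩ := List.mem_map.mp hw
      exact (pvDigit x (hl x hx).1 (hl x hx).2).2.2)]
  rw [List.filter_eq_self.mpr (by
    intro w hw
    obtain ⟨x, hx, rfl⟩ := List.mem_map.mp hw
    exact (pvDigit x (hl x hx).1 (hl x hx).2).2.1)]
  rw [List.map_map]
  congr 1
  rw [show ((fun x => (PySem.Int.ofChars? x).getD 0) ∘ PySem.Int.toChars) = fun x => (PySem.Int.ofChars? (PySem.Int.toChars x)).getD 0 from rfl]
  rw [List.map_congr_left (fun x hx => (pvDigit x (hl x hx).1 (hl x hx).2).1)]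
  exact List.map_id l

lemma pvOfList_ne (xs : List Int) (h : xs ≠ []) : PySem.Set.ofList xs ≠ [] := by
  cases xs with
  | nil => exact absurd rfl h
  | cons x t =>
    rw [PySem.Set.ofList_cons]
    exact List.cons_ne_nil _ _

lemma pvMappedNodup (cs : List Char)
    (hnodup : ((pvParseA cs).map (fun v => PySem.Int.mod v 12)).Nodup) :
    ((pvParseA cs).map (fun i => PySem.Int.mod (12 - i) 12)).Nodup := by
  have hlnodup : (pvParseA cs).Nodup := by unfold pvParseA; exact PySem.Set.nodup_ofList _
  refine List.Nodup.map_on ?_ hlnodup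
  intro x hx y hy h
  refine List.inj_on_of_nodup_map hnodup hx hy ?_
  rw [PySem.Int.mod_eq_emod_of_pos (by norm_num : (0:Int) < 12)] at h ⊢
  rw [PySem.Int.mod_eq_emod_of_pos (by norm_num : (0:Int) < 12)] at h ⊢
  omega

lemma pvInv_eq (cs : List Char) (hne : pvParseA cs ≠ [])
    (hnodup : ((pvParseA cs).map (fun v => PySem.Int.mod v 12)).Nodup) :
    PySem.List.sorted (pvParseA (PySem.Chars.join [','] ((pvInversion cs).map PySem.Int.toChars))) (fun v => v) false
      = PySem.List.sorted (PySem.Set.ofList ((pvParseB cs).map (fun v => PySem.Int.mod (12 - v) 12))) (fun v => v) false := by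
  have hmnodup := pvMappedNodup cs hnodup
  have hinvperm : (pvInversion cs).Perm ((pvParseA cs).map (fun i => PySem.Int.mod (12 - i) 12)) := by
    unfold pvInversion; exact PySem.List.sorted_perm _ _ _
  have hinvnodup : (pvInversion cs).Nodup := hinvperm.nodup_iff.mpr hmnodup
  have hinvne : pvInversion cs ≠ [] := by
    unfold pvInversion
    rw [Ne, PySem.List.sorted_eq_nil_iff]
    intro h
    exact hne (List.map_eq_nil_iff.mp h)
  have hbounds : ∀ x ∈ pvInversion cs, 0 ≤ x ∧ x < 12 := by
    intro x hx
    obtain ⟨v, _, rfl⟩ := List.mem_map.mp (hinvperm.mem_iff.mp hx)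
    exact ⟨PySem.Int.mod_nonneg _ (by norm_num), PySem.Int.mod_lt _ (by norm_num)⟩
  rw [pvParse_join (pvInversion cs) hinvne hbounds]
  rw [PySem.Set.ofList_eq_self_of_nodup _ hinvnodup]
  rw [show pvParseB cs = pvParseA cs from rfl]
  rw [PySem.Set.ofList_eq_self_of_nodup _ hmnodup]
  unfold pvInversion
  rw [PySem.List.sorted_sorted]

theorem pv_main (pcs : String) (hpre : Pre_forte_prime_form pcs) :
    forte_prime_form pcs = forte_prime_form_alt pcs := by
  unfold Pre_forte_prime_form at hpre
  obtain ⟨hp1, hp2⟩ := hpre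
  have hne : pvParseA pcs.toList ≠ [] := by
    unfold pvParseA
    exact pvOfList_ne _ (by simpa using hp1)
  have hnodup : ((pvParseA pcs.toList).map (fun v => PySem.Int.mod v 12)).Nodup := by
    unfold pvParseA
    exact hp2
  have hpb : pvParseB pcs.toList = pvParseA pcs.toList := rfl
  -- the base pitch-class list and its inversion, in B's vocabulary
  have hbase_ne : PySem.List.sorted (pvParseB pcs.toList) (fun v => v) false ≠ [] := by
    rw [Ne, PySem.List.sorted_eq_nil_iff, hpb]
    exact hne
  have hinvB_ne : PySem.List.sorted (PySem.Set.ofList ((pvParseB pcs.toList).map (fun v => PySem.Int.mod (12 - v) 12))) (fun v => v) false ≠ [] := by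
    rw [Ne, PySem.List.sorted_eq_nil_iff]
    intro h
    exact hne (by
      have := pvOfList_ne ((pvParseA pcs.toList).map (fun v => PySem.Int.mod (12 - v) 12))
        (fun hm => hne (List.map_eq_nil_iff.mp hm))
      rw [hpb] at h
      exact absurd h this)
  set n := (PySem.List.sorted (pvParseB pcs.toList) (fun v => v) false).length with hn
  have hinvlen : (PySem.List.sorted (PySem.Set.ofList ((pvParseB pcs.toList).map (fun v => PySem.Int.mod (12 - v) 12))) (fun v => v) false).length = n := by
    rw [PySem.List.length_sorted, hpb, PySem.Set.ofList_eq_self_of_nodup _ (pvMappedNodup pcs.toList hnodup),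
      List.length_map, hn, PySem.List.length_sorted, hpb]
  -- the set's normal form
  have hrots : pvGenerate_rotations pcs.toList = pvRots (PySem.List.sorted (pvParseB pcs.toList) (fun v => v) false) := rfl
  have hrotne : pvGenerate_rotations pcs.toList ≠ [] := by
    rw [hrots]; exact pvRots_ne _ hbase_ne
  have hrotlen : ∀ ps ∈ pvGenerate_rotations pcs.toList, ps.length = n := by
    rw [hrots]
    intro ps hps
    rw [pvRots_len _ ps hps]
  have specA := pvNF_spec pcs.toList n hrotne hrotlen
  have specB := pvIsMin_congr (fun ps => pvKB_true ps)
    (pvBest_spec (pvGenerate_rotations pcs.toList) true hrotne)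
  have hnf : pvForte_normal_form pcs.toList =
      pvBest (pvRots (PySem.List.sorted (pvParseB pcs.toList) (fun v => v) false)) true :=
    pvUnique specA specB
  -- the inversion's normal form
  have hinvsorted := pvInv_eq pcs.toList hne hnodup
  have hrots_js : pvGenerate_rotations (PySem.Chars.join [','] ((pvInversion pcs.toList).map PySem.Int.toChars)) =
      pvRots (PySem.List.sorted (PySem.Set.ofList ((pvParseB pcs.toList).map (fun v => PySem.Int.mod (12 - v) 12))) (fun v => v) false) := by
    rw [pvGenRots_eq, show pvParseB (PySem.Chars.join [','] ((pvInversion pcs.toList).map PySem.Int.toChars)) =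
      pvParseA (PySem.Chars.join [','] ((pvInversion pcs.toList).map PySem.Int.toChars)) from rfl, hinvsorted]
  have hrotne_js : pvGenerate_rotations (PySem.Chars.join [','] ((pvInversion pcs.toList).map PySem.Int.toChars)) ≠ [] := by
    rw [hrots_js]; exact pvRots_ne _ hinvB_ne
  have hrotlen_js : ∀ ps ∈ pvGenerate_rotations (PySem.Chars.join [','] ((pvInversion pcs.toList).map PySem.Int.toChars)), ps.length = n := by
    rw [hrots_js]
    intro ps hps
    rw [pvRots_len _ ps hps]
    exact hinvlen
  have specAj := pvNF_spec (PySem.Chars.join [','] ((pvInversion pcs.toList).map PySem.Int.toChars)) n hrotne_js hrotlen_js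
  rw [hrots_js] at specAj
  have specBj := pvIsMin_congr (fun ps => pvKB_true ps)
    (pvBest_spec (pvRots (PySem.List.sorted (PySem.Set.ofList ((pvParseB pcs.toList).map (fun v => PySem.Int.mod (12 - v) 12))) (fun v => v) false)) true
      (pvRots_ne _ hinvB_ne))
  have hnfinv : pvForte_normal_form (PySem.Chars.join [','] ((pvInversion pcs.toList).map PySem.Int.toChars)) =
      pvBest (pvRots (PySem.List.sorted (PySem.Set.ofList ((pvParseB pcs.toList).map (fun v => PySem.Int.mod (12 - v) 12))) (fun v => v) false)) true :=
    pvUnique specAj specBj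
  -- the two-candidate selection at the top level
  set nfB := pvBest (pvRots (PySem.List.sorted (pvParseB pcs.toList) (fun v => v) false)) true with hnfB
  set nfBinv := pvBest (pvRots (PySem.List.sorted (PySem.Set.ofList ((pvParseB pcs.toList).map (fun v => PySem.Int.mod (12 - v) 12))) (fun v => v) false)) true with hnfBinv
  have hlen_nf : nfB.length = n := by
    rw [hnfB]
    exact pvRots_len _ _ (pvBest_spec _ true (pvRots_ne _ hbase_ne)).1
  have hlen_nfinv : nfBinv.length = n := by
    rw [hnfBinv]
    rw [pvRots_len _ _ (pvBest_spec _ true (pvRots_ne _ hinvB_ne)).1]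
    exact hinvlen
  have hcons_ne : ([nfB, nfBinv] : List (List Int)) ≠ [] := List.cons_ne_nil _ _
  have htoplen : ∀ ps ∈ ([nfB, nfBinv] : List (List Int)), ps.length = n := by
    intro ps hps
    rcases List.mem_cons.mp hps with rfl | hps
    · exact hlen_nf
    · rw [List.mem_singleton] at hps
      subst hps
      exact hlen_nfinv
  have specTopA := pvRecSel_spec (PySem.List.pyGetD ([nfB, nfBinv] : List (List Int)) 0 ([] : List Int)).length
    [nfB, nfBinv] 1 n hcons_ne htoplen (by omega)
    (by rw [PySem.List.pyGetD_zero_cons, hlen_nf]; omega)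
  have specTopB := pvIsMin_congr (fun ps => pvKB_false ps) (pvBest_spec [nfB, nfBinv] false hcons_ne)
  have htemp : pvRecSel (PySem.List.pyGetD ([nfB, nfBinv] : List (List Int)) 0 ([] : List Int)).length [nfB, nfBinv] 1 =
      pvBest [nfB, nfBinv] false := pvUnique specTopA specTopB
  -- assemble
  unfold forte_prime_form forte_prime_form_alt
  dsimp only
  rw [hnf, hnfinv, htemp]
  simp only [sub_zero]
  rw [← hnfB, ← hnfBinv]

-- ===== VERDICT (by name: the statement is the Claim_ definition above) =====
theorem forte_prime_form_spec : Claim_equal_forte_prime_form := by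
  intro pcs _ hpre
  show forte_prime_form pcs = forte_prime_form_alt pcs
  exact pv_main pcs hpre
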